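-- pv_equiv track=rewrite | github.com/dmis-lab/ChroKnowledge | sources/process.py | classify_knowledge
-- ===== SOURCE A (Python) =====
-- def classify_knowledge(benchmark, temp0_ans, temp7_ans):
--     # Check for empty temp0_ans first
--     if not temp0_ans:
--         if not temp7_ans:
--             return 'incorrect'  # Both lists are empty
--         elif any(ans in benchmark for ans in temp7_ans):
--             return 'partial_correct2'  # Only temp7_ans has matching elements
--         else:
--             return 'incorrect'
--
--     # If temp0_ans is not empty, continue with the original logic
--     if all(ans in benchmark for ans in temp0_ans):
--         return 'correct'
--     elif any(ans in benchmark for ans in temp0_ans):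
--         return 'partial_correct1'
--     elif not any(ans in benchmark for ans in temp0_ans):
--         if any(ans in benchmark for ans in temp7_ans):
--             return 'partial_correct2'
--         else:
--             return 'incorrect'
-- ===== SOURCE B (Python) =====
-- def classify_knowledge(benchmark, temp0_ans, temp7_ans):
--     # Single short-circuiting pass over temp0_ans with two state flags:
--     # decide 'partial_correct1' the moment both a hit and a miss have been seen.
--     bench = set(benchmark)
--     hit = False
--     miss = False
--     for a in temp0_ans:
--         if a in bench:
--             hit = True
--         else:
--             miss = True
--         if hit and miss:
--             return 'partial_correct1'
--     if hit:  # loop finished with hits only (temp0_ans nonempty, all in benchmark)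
--         return 'correct'
--     # no hit at all (temp0_ans empty or all misses): fall back to temp7_ans
--     for a in temp7_ans:
--         if a in bench:
--             return 'partial_correct2'
--     return 'incorrect'
-- ===== Notes on version B (the rewrite author's own statement) =====
-- stated objective: alternative
-- what changed: B replaces A's staged all/any rescans of temp0_ans with a single short-circuiting state-machine pass over temp0_ans (two flags, returning 'partial_correct1' as soon as both a hit and a miss are seen) against a benchmark set built once, with an explicit early-exit scan of temp7_ans as fallback.
import Mathlib
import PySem

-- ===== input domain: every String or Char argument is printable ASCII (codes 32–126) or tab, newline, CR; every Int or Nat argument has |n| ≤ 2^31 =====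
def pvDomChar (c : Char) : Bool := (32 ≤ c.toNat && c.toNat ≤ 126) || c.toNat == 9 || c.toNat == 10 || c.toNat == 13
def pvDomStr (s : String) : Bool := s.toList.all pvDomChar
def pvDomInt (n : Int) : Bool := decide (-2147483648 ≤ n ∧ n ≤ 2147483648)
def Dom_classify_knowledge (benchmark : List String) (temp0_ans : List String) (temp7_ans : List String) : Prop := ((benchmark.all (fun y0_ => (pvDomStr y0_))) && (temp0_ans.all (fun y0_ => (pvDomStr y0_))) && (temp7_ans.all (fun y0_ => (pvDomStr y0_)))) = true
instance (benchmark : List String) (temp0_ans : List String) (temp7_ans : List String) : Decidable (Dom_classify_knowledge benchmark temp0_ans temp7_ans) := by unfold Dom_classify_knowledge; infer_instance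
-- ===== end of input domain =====

-- B replaces A's staged all/any rescans with one short-circuiting state-machine pass over
-- temp0_ans (flags hit/miss, early 'partial_correct1') plus an early-exit temp7 scan
-- against a benchmark set built once (objective: alternative).

-- ===== PORT A =====
def classify_knowledge (benchmark : List String) (temp0_ans : List String) (temp7_ans : List String) : String :=
  if temp0_ans.isEmpty then
    if temp7_ans.isEmpty then "incorrect"
    else if temp7_ans.any (fun ans => benchmark.contains ans) then "partial_correct2"
    else "incorrect"
  else
    if temp0_ans.all (fun ans => benchmark.contains ans) then "correct"
    else if temp0_ans.any (fun ans => benchmark.contains ans) then "partial_correct1"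
    else if ¬ (temp0_ans.any (fun ans => benchmark.contains ans)) then
      if temp7_ans.any (fun ans => benchmark.contains ans) then "partial_correct2"
      else "incorrect"
    else ""  -- unreachable: the previous elif's condition is this one's negation

-- ===== PORT B =====
-- state-machine pass over temp0_ans: `none` = returned 'partial_correct1' early,
-- `some hit` = loop finished with final hit flag
def ck_scan0 (c : String → Bool) : List String → Bool → Bool → Option Bool
  | [], hit, _ => some hit
  | a :: xs, hit, miss =>
    let hit := hit || c a
    let miss := miss || !c a
    if hit && miss then none else ck_scan0 c xs hit miss

-- early-exit fallback scan of temp7_ans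
def ck_scan7 (c : String → Bool) : List String → String
  | [] => "incorrect"
  | a :: xs => if c a then "partial_correct2" else ck_scan7 c xs

def classify_knowledge_alt (benchmark : List String) (temp0_ans : List String) (temp7_ans : List String) : String :=
  let bench := PySem.Set.ofList benchmark
  let c := fun a => PySem.Set.contains bench a
  match ck_scan0 c temp0_ans false false with
  | none => "partial_correct1"
  | some true => "correct"
  | some false => ck_scan7 c temp7_ans

-- ===== PRECONDITION & SPEC =====
def Spec_classify_knowledge (benchmark : List String) (temp0_ans : List String) (temp7_ans : List String) (out : String) : Prop := out = classify_knowledge_alt benchmark temp0_ans temp7_ans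
instance (benchmark : List String) (temp0_ans : List String) (temp7_ans : List String) (out : String) : Decidable (Spec_classify_knowledge benchmark temp0_ans temp7_ans out) := by unfold Spec_classify_knowledge; infer_instance

-- ===== CLAIM (what is proved, stated in full; the proofs are below) =====
def Claim_equal_classify_knowledge : Prop := ∀ (benchmark : List String) (temp0_ans : List String) (temp7_ans : List String), Dom_classify_knowledge benchmark temp0_ans temp7_ans → Spec_classify_knowledge benchmark temp0_ans temp7_ans (classify_knowledge benchmark temp0_ans temp7_ans)

-- ===== LEMMAS AND PROOFS =====

-- set(benchmark) membership agrees with list membership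
lemma ck_bench_contains (benchmark : List String) (a : String) :
    PySem.Set.contains (PySem.Set.ofList benchmark) a = benchmark.contains a := by
  simp [PySem.Set.contains_eq_listContains]

-- characterization of the state-machine pass on reachable states
lemma ck_scan0_char (c : String → Bool) (xs : List String) (hit miss : Bool)
    (h : (hit && miss) = false) :
    ck_scan0 c xs hit miss =
      if (hit || xs.any c) && (miss || xs.any (fun a => !c a)) then none
      else some (hit || xs.any c) := by
  induction xs generalizing hit miss with
  | nil => simp [ck_scan0, h]
  | cons a xs ih =>
    simp only [ck_scan0, List.any_cons]
    by_cases hb : ((hit || c a) && (miss || !c a)) = true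
    · have : ((hit || (c a || xs.any c)) && (miss || (!c a || xs.any fun a => !c a))) = true := by
        cases hhit : hit <;> cases hca : c a <;> simp_all
      simp [hb, this]
    · simp only [Bool.not_eq_true] at hb
      rw [if_neg (by simp [hb]), ih _ _ hb]
      cases hhit : hit <;> cases hca : c a <;> simp_all

-- the fallback scan equals the any-test
lemma ck_scan7_char (c : String → Bool) (xs : List String) :
    ck_scan7 c xs = if xs.any c then "partial_correct2" else "incorrect" := by
  induction xs with
  | nil => simp [ck_scan7]
  | cons a xs ih =>
    simp only [ck_scan7, List.any_cons]
    by_cases hca : c a = true <;> simp [hca, ih]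

-- any-of-negation is the negation of all
lemma ck_any_not (c : String → Bool) (l : List String) :
    l.any (fun x => !c x) = !l.all c := by
  induction l with
  | nil => simp
  | cons y ys ih => simp [List.any_cons, List.all_cons, ih, Bool.not_and]

-- the whole equivalence, over an abstract membership predicate
lemma ck_main (c : String → Bool) (t0 t7 : List String) :
    (if t0.isEmpty then
        (if t7.isEmpty then "incorrect"
         else if t7.any c then "partial_correct2" else "incorrect")
      else if t0.all c then "correct"
      else if t0.any c then "partial_correct1"
      else if ¬ (t0.any c = true) then
        (if t7.any c then "partial_correct2" else "incorrect")
      else "")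
    = (match ck_scan0 c t0 false false with
       | none => "partial_correct1"
       | some true => "correct"
       | some false => ck_scan7 c t7) := by
  rw [ck_scan0_char c t0 false false (by simp), ck_scan7_char, ck_any_not]
  cases t0 with
  | nil =>
    cases t7 with
    | nil => simp
    | cons b ys => cases h7 : (b :: ys).any c <;> simp_all
  | cons a xs =>
    cases hall : (a :: xs).all c with
    | true =>
      have hany : (a :: xs).any c = true := by
        simp only [List.all_cons, Bool.and_eq_true] at hall
        simp [List.any_cons, hall.1]
      simp [hany]
    | false =>
      cases hany : (a :: xs).any c <;> simp_all

-- ===== VERDICT (by name: the statement is the Claim_ definition above) =====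
theorem classify_knowledge_spec : Claim_equal_classify_knowledge := by
  intro benchmark temp0_ans temp7_ans _
  unfold Spec_classify_knowledge classify_knowledge classify_knowledge_alt
  simp only [ck_bench_contains]
  exact ck_main (fun a => benchmark.contains a) temp0_ans temp7_ans
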